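-- pv_equiv track=rewrite | github.com/HughDen/OrdinalPatterns | src/alcoves.py | address_to_ordinal_pattern
-- ===== SOURCE A (Python) =====
-- def address_to_ordinal_pattern(address):
--     '''
--     Return the ordinal pattern associated to the given address.
--
--     Keyword arguments:
--     address -- A tuple of tuples representing an alcove's address
--
--         >>> address_to_ordinal_pattern(((-1,0,0),(-1,0),(0,)))
--         (3, 1, 2, 4)
--
--     '''
--
--     n = len(address)
--     code = [0 for _ in range(n+1)]
--
--     for i in range(n):
--         for j in range(n - i):
--             if address[i][j] < 0:
--                 code[j] += 1
--
--     return code_to_permutation(code)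
--
-- def code_to_permutation(code):
--     '''
--     Return the permutation for the given code. The code here is the standard
--     Lehmer code in which each entry records the number of inversions from
--     that position.
--
--     Keyword arguments:
--     code -- A tuple or list from [0,n-1] X [0,n-2] X ... {0}
--
--         >>> code_to_permutation((2,0,0,0))
--         (3, 1, 2, 4)
--
--     '''
--
--     values = list(range(1,len(code) + 1))
--     permutation = []
--
--     for i in range(len(code)):
--         permutation.append(values[code[i]])
--         del values[code[i]]
--
--     return tuple(permutation)
-- ===== SOURCE B (Python) =====
-- def address_to_ordinal_pattern(address):
--     '''Return the ordinal pattern associated to the given address.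
--
--     Column-major count of the Lehmer code, then decode it with a
--     used-marker table instead of deleting from a shrinking value list.
--     '''
--     n = len(address)
--     code = [sum(1 for i in range(n - j) if address[i][j] < 0) for j in range(n)]
--     code.append(0)
--     used = [False] * (n + 1)
--     perm = []
--     for c in code:
--         v = kth_unused(used, c)
--         used[v] = True
--         perm.append(v + 1)
--     return tuple(perm)
--
--
-- def kth_unused(used, c):
--     '''Return the index of the (c+1)-th False entry of used, or None.'''
--     for v, u in enumerate(used):
--         if not u:
--             if c == 0:
--                 return v
--             c -= 1
--     return None
-- ===== Notes on version B (the rewrite author's own statement) =====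
-- stated objective: alternative
-- what changed: B builds the Lehmer code column-by-column as per-column counts (instead of A's row-major double loop incrementing a shared array) and decodes it with a used-marker table, scanning for the (c+1)-th still-unused value, instead of A's shrinking value list with deletion.
import Mathlib
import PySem

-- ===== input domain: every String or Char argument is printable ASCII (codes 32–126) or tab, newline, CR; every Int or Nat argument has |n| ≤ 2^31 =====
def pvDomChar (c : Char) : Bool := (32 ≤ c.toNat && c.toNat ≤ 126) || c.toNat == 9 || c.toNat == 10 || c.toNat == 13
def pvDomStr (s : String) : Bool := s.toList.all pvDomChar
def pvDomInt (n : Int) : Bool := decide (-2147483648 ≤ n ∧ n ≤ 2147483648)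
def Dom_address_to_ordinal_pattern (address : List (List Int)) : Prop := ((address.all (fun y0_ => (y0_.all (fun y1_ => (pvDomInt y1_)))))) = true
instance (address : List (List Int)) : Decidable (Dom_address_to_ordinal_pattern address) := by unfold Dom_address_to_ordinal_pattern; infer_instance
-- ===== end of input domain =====

-- B rebuilds the Lehmer code column-by-column as counts and decodes it with a
-- used-marker table (k-th unused scan) instead of A's shrinking value list with
-- deletion; an alternative decomposition of the same cost, not claimed faster.

-- ===== PORT A =====
-- Helper of A: decode a Lehmer code by repeatedly picking and deleting from
-- a list of remaining values.  `values[code[i]]` followed by `del values[code[i]]`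
-- is transliterated as the single Python-equivalent primitive `pop?`; the
-- unreachable `none` branch (Python would raise IndexError; the code produced by
-- address_to_ordinal_pattern is always in range) leaves the state unchanged.
def code_to_permutation (code : List Int) : List Int :=
  let values : List Int := (List.range code.length).map (fun (v : Nat) => (v : Int) + 1)
  (code.foldl (fun (st : List Int × List Int) c =>
      match PySem.List.pop? st.1 c with
      | some (v, rest) => (rest, st.2 ++ [v])
      | none => st) (values, [])).2

-- A: row-major double loop incrementing code[j] whenever address[i][j] < 0.
-- Indices i, j from range() are nonnegative, so plain Nat indexing is exact;
-- `getD _ 0` where Python would raise IndexError (short rows) is excluded by Pre_.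
def address_to_ordinal_pattern (address : List (List Int)) : List Int :=
  let n := address.length
  let code := (List.range n).foldl (fun code i =>
      (List.range (n - i)).foldl (fun code j =>
        if (address.getD i []).getD j 0 < 0 then code.set j (code.getD j 0 + 1) else code) code)
    (List.replicate (n + 1) (0 : Int))
  code_to_permutation code

-- ===== PORT B =====
-- Helper of B: index of the (c+1)-th `false` entry of `used` (Python kth_unused).
def kthUnused (used : List Bool) (c : Int) : Option Nat :=
  match used with
  | [] => none
  | b :: t =>
    if b then (kthUnused t c).map (· + 1)
    else if c = 0 then some 0 else (kthUnused t (c - 1)).map (· + 1)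

-- B: column-major count comprehension for the code, then decode with a
-- used-marker table.  The unreachable `none` branch (Python B would index with
-- None) leaves the state unchanged.
def address_to_ordinal_pattern_alt (address : List (List Int)) : List Int :=
  let n := address.length
  let code : List Int :=
    ((List.range n).map (fun j =>
      (((List.range (n - j)).countP (fun i => (address.getD i []).getD j 0 < 0)) : Int))) ++ [0]
  (code.foldl (fun (st : List Bool × List Int) c =>
      match kthUnused st.1 c with
      | some v => (st.1.set v true, st.2 ++ [(v : Int) + 1])
      | none => st) (List.replicate (n + 1) false, [])).2

-- ===== PRECONDITION & SPEC =====
-- Pre_ excludes exactly the inputs on which A raises IndexError: some row i is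
-- shorter than the n-i entries the loops read from it (B raises there too).
def Pre_address_to_ordinal_pattern (address : List (List Int)) : Prop :=
  ∀ i ∈ List.range address.length, address.length - i ≤ (address.getD i []).length
instance (address : List (List Int)) : Decidable (Pre_address_to_ordinal_pattern address) := by
  unfold Pre_address_to_ordinal_pattern; infer_instance

def pvWitness_address_to_ordinal_pattern : List (List Int) := [[-1, 0, 0], [-1, 0], [0]]

def Spec_address_to_ordinal_pattern (address : List (List Int)) (out : List Int) : Prop :=
  out = address_to_ordinal_pattern_alt address
instance (address : List (List Int)) (out : List Int) : Decidable (Spec_address_to_ordinal_pattern address out) := by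
  unfold Spec_address_to_ordinal_pattern; infer_instance

-- ===== CLAIM (what is proved, stated in full; the proofs are below) =====
def Claim_equal_address_to_ordinal_pattern : Prop := ∀ (address : List (List Int)), Dom_address_to_ordinal_pattern address → Pre_address_to_ordinal_pattern address → Spec_address_to_ordinal_pattern address (address_to_ordinal_pattern address)

-- ===== LEMMAS AND PROOFS =====

-- Positions of the `false` entries of a marker list (the remaining values).
def pvRem (used : List Bool) : List Nat :=
  match used with
  | [] => []
  | b :: t => if b then (pvRem t).map (· + 1) else 0 :: (pvRem t).map (· + 1)

theorem pvRem_replicate_false (m : Nat) : pvRem (List.replicate m false) = List.range m := by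
  induction m with
  | zero => rfl
  | succ m ih => simp [List.replicate_succ, pvRem, ih, List.range_succ_eq_map]

set_option maxRecDepth 8192 in
theorem kthUnused_eq (used : List Bool) (c : Int) (hc : 0 ≤ c) :
    kthUnused used c = (pvRem used)[c.toNat]? := by
  induction used generalizing c with
  | nil => rw [kthUnused, pvRem]; simp
  | cons b t ih =>
    rw [kthUnused, pvRem]
    cases b with
    | true => simp [ih c hc, List.getElem?_map]
    | false =>
      by_cases hc0 : c = 0
      · simp [hc0]
      · have h1 : 0 ≤ c - 1 := by omega
        have h2 : c.toNat = (c - 1).toNat + 1 := by omega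
        rw [if_neg (by simp), if_neg hc0, h2]
        simp [ih (c - 1) h1, List.getElem?_map]

set_option maxRecDepth 8192 in
theorem pvRem_set (used : List Bool) (c : Int) (k : Nat) (hc : 0 ≤ c)
    (h : kthUnused used c = some k) :
    pvRem (used.set k true) = (pvRem used).eraseIdx c.toNat := by
  induction used generalizing c k with
  | nil => rw [kthUnused] at h; exact absurd h (by simp)
  | cons b t ih =>
    rw [kthUnused] at h
    cases b with
    | true =>
      rw [if_pos rfl, Option.map_eq_some_iff] at h
      obtain ⟨k', hk', rfl⟩ := h
      rw [List.set_cons_succ, pvRem, pvRem]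
      simp [ih c k' hc hk', List.eraseIdx_map]
    | false =>
      rw [if_neg (by simp)] at h
      by_cases hc0 : c = 0
      · rw [if_pos hc0, Option.some.injEq] at h
        subst h
        rw [List.set_cons_zero, pvRem, pvRem]
        simp [hc0]
      · rw [if_neg hc0, Option.map_eq_some_iff] at h
        obtain ⟨k', hk', rfl⟩ := h
        have h1 : 0 ≤ c - 1 := by omega
        have h2 : c.toNat = (c - 1).toNat + 1 := by omega
        rw [List.set_cons_succ, pvRem, pvRem, h2]
        simp [ih (c - 1) k' h1 hk', List.eraseIdx_map]

theorem pop?_none_of_ge (xs : List Int) (i : Int) (h : 0 ≤ i) (h2 : xs.length ≤ i.toNat) :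
    PySem.List.pop? xs i = none := by
  have h3 : ¬ (i < (xs.length : Int)) := by omega
  simp [PySem.List.pop?, PySem.List.pyIdx?, h, h3]

-- getD after set, in closed form.
theorem getD_set_closed (l : List Int) (i j : Nat) (x : Int) :
    (l.set i x).getD j 0 = if i = j ∧ i < l.length then x else l.getD j 0 := by
  simp only [List.getD_eq_getElem?_getD, List.getElem?_set]
  split_ifs with h1 h2 <;> simp_all
  omega

-- One inner row pass: the effect on entry j of incrementing code[j'] for each
-- j' < m with P j'.
theorem inc_fold_length (P : Nat → Prop) [DecidablePred P] (l : List Nat) (code : List Int) :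
    (l.foldl (fun code j => if P j then code.set j (code.getD j 0 + 1) else code) code).length
    = code.length := by
  induction l generalizing code with
  | nil => rfl
  | cons j l ih =>
    rw [List.foldl_cons, ih]
    by_cases h : P j <;> simp [h]

theorem inc_fold_getD (P : Nat → Prop) [DecidablePred P] (m : Nat) (code : List Int) (j : Nat)
    (hm : m ≤ code.length) :
    ((List.range m).foldl (fun code j' => if P j' then code.set j' (code.getD j' 0 + 1) else code)
      code).getD j 0
    = code.getD j 0 + (if j < m ∧ P j then 1 else 0) := by
  induction m with
  | zero => simp
  | succ m ih =>
    rw [List.range_succ, List.foldl_append, List.foldl_cons, List.foldl_nil]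
    have hm' : m ≤ code.length := by omega
    have hlen : ((List.range m).foldl (fun code j' =>
        if P j' then code.set j' (code.getD j' 0 + 1) else code) code).length = code.length :=
      inc_fold_length P _ code
    by_cases hP : P m
    · rw [if_pos hP, getD_set_closed, hlen, ih hm']
      by_cases hj : m = j <;> split_ifs <;> simp_all <;> omega
    · rw [if_neg hP, ih hm']
      by_cases hj : j = m
      · subst hj; simp [hP]
      · by_cases hPj : P j
        · simp only [hPj, and_true]
          simp only [show (j < m + 1) ↔ (j < m) from by omega]
        · simp [hPj]

-- The whole double loop of A, entrywise: entry j counts the pairs (i, j) with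
-- i < k, j < n - i and P i j.
theorem code_fold_length (n k : Nat) (P : Nat → Nat → Prop) [∀ i j, Decidable (P i j)] :
    ((List.range k).foldl (fun code i =>
        (List.range (n - i)).foldl (fun code j' =>
          if P i j' then code.set j' (code.getD j' 0 + 1) else code) code)
      (List.replicate (n + 1) (0 : Int))).length = n + 1 := by
  induction k with
  | zero => simp
  | succ k ih => rw [List.range_succ, List.foldl_append, List.foldl_cons, List.foldl_nil,
                     inc_fold_length, ih]

theorem code_fold_getD (n k : Nat) (P : Nat → Nat → Prop) [∀ i j, Decidable (P i j)] (j : Nat)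
    (hk : k ≤ n) :
    ((List.range k).foldl (fun code i =>
        (List.range (n - i)).foldl (fun code j' =>
          if P i j' then code.set j' (code.getD j' 0 + 1) else code) code)
      (List.replicate (n + 1) (0 : Int))).getD j 0
    = ((List.range k).countP (fun i => decide (j < n - i) && decide (P i j)) : Int) := by
  induction k with
  | zero => simp [List.getD]
  | succ k ih =>
    rw [List.range_succ, List.foldl_append, List.foldl_cons, List.foldl_nil]
    have hlen := code_fold_length n k P
    have hm : n - k ≤ ((List.range k).foldl (fun code i =>
        (List.range (n - i)).foldl (fun code j' =>
          if P i j' then code.set j' (code.getD j' 0 + 1) else code) code)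
      (List.replicate (n + 1) (0 : Int))).length := by rw [hlen]; omega
    rw [inc_fold_getD (P k) (n - k) _ j hm, ih (by omega),
        List.countP_append, List.countP_singleton]
    by_cases h1 : j < n - k <;> by_cases h2 : P k j <;> simp [h1, h2]

-- Truncating a range-count by a bound below the range length.
theorem countP_range_restrict (N m : Nat) (q : Nat → Bool) (h : m ≤ N) :
    (List.range N).countP (fun i => decide (i < m) && q i) = (List.range m).countP q := by
  induction N with
  | zero =>
    have : m = 0 := by omega
    subst this; simp
  | succ N ih =>
    by_cases hm : m = N + 1
    · subst hm
      apply List.countP_congr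
      intro i hi
      have : i < N + 1 := List.mem_range.mp hi
      simp [this]
    · have h' : m ≤ N := by omega
      rw [List.range_succ, List.countP_append, List.countP_singleton, ih h']
      have : ¬ N < m := by omega
      simp [this]

-- A's row-major incrementing double loop produces exactly B's column-major
-- count comprehension (with the trailing 0).
theorem code_eq (address : List (List Int)) :
    ((List.range address.length).foldl (fun code i =>
        (List.range (address.length - i)).foldl (fun code j =>
          if (address.getD i []).getD j 0 < 0 then code.set j (code.getD j 0 + 1) else code) code)
      (List.replicate (address.length + 1) (0 : Int)))
    = ((List.range address.length).map (fun j =>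
        (((List.range (address.length - j)).countP
          (fun i => (address.getD i []).getD j 0 < 0)) : Int))) ++ [0] := by
  set n := address.length with hn
  apply List.ext_getElem?
  intro j
  have hlenL := code_fold_length n n (fun i j => (address.getD i []).getD j 0 < 0)
  beta_reduce at hlenL
  have hlenR : (((List.range n).map (fun j =>
      (((List.range (n - j)).countP
        (fun i => decide ((address.getD i []).getD j 0 < 0))) : Int))) ++ [(0 : Int)]).length
      = n + 1 := by simp
  by_cases hj : j < n + 1
  · have hL : ((List.range n).foldl (fun code i =>
        (List.range (n - i)).foldl (fun code j =>
          if (address.getD i []).getD j 0 < 0 then code.set j (code.getD j 0 + 1) else code) code)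
      (List.replicate (n + 1) (0 : Int)))[j]?
      = some (((List.range n).countP
          (fun i => decide (j < n - i) && decide ((address.getD i []).getD j 0 < 0)) : Int)) := by
      have := code_fold_getD n n (fun i j => (address.getD i []).getD j 0 < 0) j (le_refl n)
      beta_reduce at this
      have hjlt : j < n + 1 := hj
      rw [← hlenL] at hjlt
      rw [List.getElem?_eq_getElem hjlt]
      congr 1
      rw [List.getD_eq_getElem?_getD, List.getElem?_eq_getElem hjlt] at this
      simpa using this
    rw [hL]
    by_cases hjn : j < n
    · rw [List.getElem?_append_left (by simpa using hjn), List.getElem?_map,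
          List.getElem?_range hjn]
      simp only [Option.map_some]
      congr 2
      rw [show (fun i => decide (j < n - i) && decide ((address.getD i []).getD j 0 < 0))
            = (fun i => decide (i < n - j) && decide ((address.getD i []).getD j 0 < 0)) from
          funext (fun i => by congr 1; simp; omega)]
      exact countP_range_restrict n (n - j) _ (by omega)
    · have hjn' : j = n := by omega
      subst hjn'
      rw [List.getElem?_append_right (by simp)]
      simp only [List.length_map, List.length_range]
      simp
  · rw [List.getElem?_eq_none, List.getElem?_eq_none]
    · rw [hlenR]; omega
    · rw [hlenL]; omega

-- The two decode loops agree whenever A's value list is exactly the remaining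
-- (unused) values v+1 in increasing order.
theorem decode_eq (code : List Int) (hc : ∀ c ∈ code, 0 ≤ c)
    (used : List Bool) (acc : List Int) :
    (code.foldl (fun (st : List Int × List Int) c =>
        match PySem.List.pop? st.1 c with
        | some (v, rest) => (rest, st.2 ++ [v])
        | none => st) ((pvRem used).map (fun (v : Nat) => (v : Int) + 1), acc)).2
    = (code.foldl (fun (st : List Bool × List Int) c =>
        match kthUnused st.1 c with
        | some v => (st.1.set v true, st.2 ++ [(v : Int) + 1])
        | none => st) (used, acc)).2 := by
  induction code generalizing used acc with
  | nil => rfl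
  | cons c rest ih =>
    have hc0 : 0 ≤ c := hc c (by simp)
    have hcr : ∀ x ∈ rest, 0 ≤ x := fun x hx => hc x (by simp [hx])
    rw [List.foldl_cons, List.foldl_cons]
    by_cases hk : c.toNat < (pvRem used).length
    · have hcast : c = ((c.toNat : Nat) : Int) := by omega
      have hklt : c.toNat < ((pvRem used).map (fun (v : Nat) => (v : Int) + 1)).length := by
        simpa using hk
      have hpop := PySem.List.pop?_natCast ((pvRem used).map (fun (v : Nat) => (v : Int) + 1)) c.toNat hklt
      rw [← hcast] at hpop
      rw [List.getElem_map] at hpop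
      rw [show ((pvRem used).map (fun (v : Nat) => (v : Int) + 1)).eraseIdx c.toNat
            = ((pvRem used).eraseIdx c.toNat).map (fun (v : Nat) => (v : Int) + 1) from by
          simp [List.eraseIdx_map]] at hpop
      have hfind : kthUnused used c = some ((pvRem used)[c.toNat]) := by
        rw [kthUnused_eq used c hc0, List.getElem?_eq_getElem hk]
      rw [hpop, hfind]
      rw [← pvRem_set used c _ hc0 hfind]
      exact ih hcr _ _
    · have hge : ((pvRem used).map (fun (v : Nat) => (v : Int) + 1)).length ≤ c.toNat := by
        simpa using Nat.le_of_not_lt hk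
      have hpop := pop?_none_of_ge _ c hc0 hge
      have hfind : kthUnused used c = none := by
        rw [kthUnused_eq used c hc0]
        exact List.getElem?_eq_none (Nat.le_of_not_lt hk)
      rw [hpop, hfind]
      exact ih hcr used acc

-- ===== VERDICT (by name: the statement is the Claim_ definition above) =====
theorem address_to_ordinal_pattern_spec : Claim_equal_address_to_ordinal_pattern := by
  intro address _ _
  unfold Spec_address_to_ordinal_pattern
  simp only [address_to_ordinal_pattern, address_to_ordinal_pattern_alt, code_to_permutation]
  rw [code_eq address]
  have hnonneg : ∀ c ∈ ((List.range address.length).map (fun j =>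
      (((List.range (address.length - j)).countP
        (fun i => (address.getD i []).getD j 0 < 0)) : Int))) ++ [(0 : Int)], 0 ≤ c := by
    intro c hcm
    rcases List.mem_append.mp hcm with h | h
    · rcases List.mem_map.mp h with ⟨j, _, rfl⟩
      positivity
    · simp at h
      omega
  have hlen : (((List.range address.length).map (fun j =>
      (((List.range (address.length - j)).countP
        (fun i => (address.getD i []).getD j 0 < 0)) : Int))) ++ [(0 : Int)]).length
      = address.length + 1 := by simp
  rw [hlen]
  rw [show List.range (address.length + 1)
        = pvRem (List.replicate (address.length + 1) false) from
      (pvRem_replicate_false (address.length + 1)).symm]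
  exact decode_eq _ hnonneg _ _
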